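-- pv_equiv track=rewrite | github.com/8Dionysus/ATM10-Agent | src/agent_core/vlm_openvino.py | _strip_reasoning_markup
-- ===== SOURCE A (Python) =====
-- def _strip_reasoning_markup(response_text: str) -> str:
--     normalized = str(response_text or "").strip()
--     while normalized.startswith("<think>"):
--         end_index = normalized.find("</think>")
--         if end_index < 0:
--             return normalized
--         normalized = normalized[end_index + len("</think>") :].lstrip()
--     return normalized
-- ===== SOURCE B (Python) =====
-- def _strip_reasoning_markup(response_text: str) -> str:
--     # Single index walk over the stripped string: advance a cursor past each
--     # leading <think>...</think> block and its trailing whitespace, then take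
--     # one final slice (no intermediate string copies).
--     s = str(response_text or "").strip()
--     i = 0
--     while s.startswith("<think>", i):
--         j = s.find("</think>", i)
--         if j < 0:
--             break
--         i = j + len("</think>")
--         while i < len(s) and s[i].isspace():
--             i += 1
--     return s[i:]
-- ===== Notes on version B (the rewrite author's own statement) =====
-- stated objective: alternative
-- what changed: Replaces A's repeated slice-and-lstrip rewriting of the string with a single cursor walked over the stripped string (skipping blocks and whitespace by index) and one final slice, avoiding intermediate string copies.
import Mathlib
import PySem

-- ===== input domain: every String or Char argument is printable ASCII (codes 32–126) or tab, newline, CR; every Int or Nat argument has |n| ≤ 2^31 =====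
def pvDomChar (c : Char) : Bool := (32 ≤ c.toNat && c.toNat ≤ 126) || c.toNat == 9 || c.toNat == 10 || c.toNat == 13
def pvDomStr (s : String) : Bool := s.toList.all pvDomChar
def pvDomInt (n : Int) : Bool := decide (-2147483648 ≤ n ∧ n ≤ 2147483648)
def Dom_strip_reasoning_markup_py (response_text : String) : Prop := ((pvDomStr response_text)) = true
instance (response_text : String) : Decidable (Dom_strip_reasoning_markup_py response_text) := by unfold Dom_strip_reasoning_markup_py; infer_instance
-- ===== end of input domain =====

-- B is an alternative single-cursor formulation of A (one final slice instead of
-- repeated slice+lstrip copies); the theorem states return-value equality on all inputs.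

-- ===== PORT A =====
-- A's while loop as structural recursion on the current string (as List Char);
-- normalized[end_index+8:] is PySem.List.slice, .lstrip() is PySem.Chars.lstrip.
def pvStripA (cs : List Char) : List Char :=
  if hpre : PySem.Chars.startswith cs "<think>".toList then
    let e := PySem.Chars.find cs "</think>".toList
    if he : e < 0 then cs
    else pvStripA (PySem.Chars.lstrip (PySem.List.slice cs (some (e + 8)) none))
  else cs
termination_by cs.length
decreasing_by
  have h7 : ("<think>".toList) <+: cs := (PySem.Chars.startswith_iff _ _).mp hpre
  have hlen : 7 ≤ cs.length := by simpa using h7.length_le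
  have h0 : (0:Int) ≤ e + 8 := by omega
  rw [PySem.List.slice_from _ h0]
  have hd := List.length_dropWhile_le PySem.Chars.isspace (List.drop (e+8).toNat cs)
  simp only [List.length_drop] at hd
  simp only [PySem.Chars.lstrip]
  omega

-- `str(response_text or "")` is response_text itself when nonempty and "" otherwise;
-- both strip to the same value, so the port applies .strip() directly.
def strip_reasoning_markup_py (response_text : String) : String :=
  String.ofList (pvStripA (PySem.Chars.strip response_text.toList))

-- ===== PORT B =====
-- the inner `while i < len(s) and s[i].isspace(): i += 1` (nested ifs = the short-circuit `and`)
def pvSkipWs (cs : List Char) (i : Nat) : Nat :=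
  if h : i < cs.length then
    if PySem.Chars.isspace cs[i] then pvSkipWs cs (i + 1) else i
  else i
termination_by cs.length - i

-- needed by pvLoopB's termination proof
theorem pvSkipWs_ge (cs : List Char) (i : Nat) : i ≤ pvSkipWs cs i := by
  fun_induction pvSkipWs cs i <;> omega

-- B's outer while loop: `s.startswith("<think>", i)` is startswith on the drop-i
-- suffix; `s.find("</think>", i)` is PySem.Chars.findFrom.
def pvLoopB (cs : List Char) (i : Nat) : Nat :=
  if hpre : PySem.Chars.startswith (cs.drop i) "<think>".toList then
    let j := PySem.Chars.findFrom cs "</think>".toList (i : Int) none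
    if hj : j < 0 then i
    else pvLoopB cs (pvSkipWs cs (j + 8).toNat)
  else i
termination_by cs.length - i
decreasing_by
  have h7 : ("<think>".toList) <+: cs.drop i := (PySem.Chars.startswith_iff _ _).mp hpre
  have hlen : 7 ≤ cs.length - i := by simpa using h7.length_le
  have hile : i ≤ cs.length := by omega
  have hne : PySem.Chars.findFrom cs "</think>".toList (i : Int) none ≠ -1 := by omega
  have hspec := PySem.Chars.findFrom_natCast_spec cs "</think>".toList i hile hne
  have hge := pvSkipWs_ge cs ((PySem.Chars.findFrom cs "</think>".toList (i : Int) none) + 8).toNat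
  omega

-- B returns s[i:] with 0 ≤ i ≤ len(s), which is List.drop i (PySem.List.slice_from).
def strip_reasoning_markup_py_alt (response_text : String) : String :=
  let cs := PySem.Chars.strip response_text.toList
  String.ofList (cs.drop (pvLoopB cs 0))

-- ===== PRECONDITION & SPEC =====
def Spec_strip_reasoning_markup_py (response_text : String) (out : String) : Prop := out = strip_reasoning_markup_py_alt response_text
instance (response_text : String) (out : String) : Decidable (Spec_strip_reasoning_markup_py response_text out) := by unfold Spec_strip_reasoning_markup_py; infer_instance

-- ===== CLAIM (what is proved, stated in full; the proofs are below) =====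
def Claim_equal_strip_reasoning_markup_py : Prop := ∀ (response_text : String), Dom_strip_reasoning_markup_py response_text → Spec_strip_reasoning_markup_py response_text (strip_reasoning_markup_py response_text)

-- ===== LEMMAS AND PROOFS =====

theorem pvSkipWs_le (cs : List Char) (i : Nat) (h : i ≤ cs.length) :
    pvSkipWs cs i ≤ cs.length := by
  fun_induction pvSkipWs cs i with
  | case1 i h' hs ih => exact ih (by omega)
  | case2 i h' hs => exact h
  | case3 i h' => exact h

-- lstrip of a suffix = dropping up to the cursor pvSkipWs reaches
theorem pvLstrip_drop (cs : List Char) (i : Nat) :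
    PySem.Chars.lstrip (cs.drop i) = cs.drop (pvSkipWs cs i) := by
  fun_induction pvSkipWs cs i with
  | case1 i h hs ih =>
      have hcons : PySem.Chars.lstrip (List.drop i cs) = PySem.Chars.lstrip (List.drop (i + 1) cs) := by
        rw [List.drop_eq_getElem_cons h]
        simp only [PySem.Chars.lstrip, List.dropWhile_cons]
        rw [if_pos hs]
      rw [hcons]; exact ih
  | case2 i h hs =>
      rw [List.drop_eq_getElem_cons h]
      simp only [PySem.Chars.lstrip, List.dropWhile_cons]
      rw [if_neg (by simp [hs])]
  | case3 i h =>
      rw [List.drop_eq_nil_of_le (by omega)]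
      simp [PySem.Chars.lstrip]

-- main invariant: A's current string is always the drop-suffix at B's cursor
theorem pvMain (cs : List Char) :
    ∀ n i, cs.length - i ≤ n → i ≤ cs.length →
      pvStripA (cs.drop i) = cs.drop (pvLoopB cs i) := by
  intro n
  induction n with
  | zero =>
      intro i hfuel hile
      have hnil : cs.drop i = [] := List.drop_eq_nil_of_le (by omega)
      unfold pvStripA pvLoopB
      rw [hnil]
      simp [PySem.Chars.startswith]
      omega
  | succ n ih =>
      intro i hfuel hile
      unfold pvStripA pvLoopB
      by_cases hpre : PySem.Chars.startswith (cs.drop i) "<think>".toList = true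
      · rw [dif_pos hpre, dif_pos hpre]
        simp only []
        have h7 : ("<think>".toList) <+: cs.drop i := (PySem.Chars.startswith_iff _ _).mp hpre
        have hlen : 7 ≤ cs.length - i := by simpa using h7.length_le
        set e := PySem.Chars.find (cs.drop i) "</think>".toList with he
        have hbr := PySem.Chars.findFrom_natCast cs "</think>".toList i hile
        rw [← he] at hbr
        have hem1 : -1 ≤ e := PySem.Chars.neg_one_le_find _ _
        by_cases hneg : e < 0
        · have he1 : e = -1 := by omega
          have hjneg : PySem.Chars.findFrom cs "</think>".toList (i : Int) none < 0 := by
            rw [hbr, he1]; norm_num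
          rw [dif_pos hneg, dif_pos hjneg]
        · have hj : PySem.Chars.findFrom cs "</think>".toList (i : Int) none = (i : Int) + e := by
            rw [hbr, if_neg (by omega)]
          have hjpos : ¬ PySem.Chars.findFrom cs "</think>".toList (i : Int) none < 0 := by
            rw [hj]; omega
          rw [dif_neg hneg, dif_neg hjpos]
          -- occurrence gives room: e + 8 ≤ length of the suffix
          have hocc := (PySem.Chars.find_spec (s := cs.drop i) (sub := "</think>".toList)
            (by omega)).1
          rw [← he] at hocc
          have hocclen : e.toNat + 8 ≤ cs.length - i := by
            have hl := hocc.length_le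
            have h8 : ("</think>".toList).length = 8 := by decide
            rw [h8, List.length_drop, List.length_drop] at hl
            omega
          -- rewrite A's sliced argument as a drop of cs
          have hslice : PySem.List.slice (cs.drop i) (some (e + 8)) none
              = cs.drop (i + (e + 8).toNat) := by
            rw [PySem.List.slice_from _ (by omega), List.drop_drop]
          have harg : ((i : Int) + e + 8).toNat = i + (e + 8).toNat := by omega
          rw [hslice, hj, harg, pvLstrip_drop]
          have hk8 : i + (e + 8).toNat ≤ cs.length := by omega
          have hge := pvSkipWs_ge cs (i + (e + 8).toNat)
          exact ih _ (by omega) (pvSkipWs_le cs _ hk8)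
      · rw [dif_neg hpre, dif_neg hpre]

-- ===== VERDICT (by name: the statement is the Claim_ definition above) =====
theorem strip_reasoning_markup_py_spec : Claim_equal_strip_reasoning_markup_py := by
  intro s _
  unfold Spec_strip_reasoning_markup_py strip_reasoning_markup_py strip_reasoning_markup_py_alt
  have := pvMain (PySem.Chars.strip s.toList) (PySem.Chars.strip s.toList).length 0
    (by omega) (by omega)
  simpa using congrArg String.ofList this
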